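-- pv_equiv track=rewrite | github.com/ValMobYKang/advent-code | 2023/day14/q1.py | get_cal
-- ===== SOURCE A (Python) =====
-- def get_cal(line, i):
--     """
--     # >>> get_cal(line=['O', 'O', '.', 'O', '.', 'O', '.', '.', '#', '#'],i=3)
--     # ['O', 'O', 'O', '.', '.', 'O', '.', '.', '#', '#']
--     >>> get_cal(line=['#', '.', '#', '.', '.', 'O', '#', '.', '#', '#'], i=5)
--     ['#', '.', '#', 'O', '.', '.', '#', '.', '#', '#']
--     """
--     ret_line = line.copy()
--     while i - 1 > 0 and line[i-1] == '.':
--         ret_line[i-1], ret_line[i] = ret_line[i], ret_line[i-1]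
--         i-=1
--     if i == 1 and line[i-1] == '.':
--         ret_line[i-1], ret_line[i] = ret_line[i], ret_line[i-1]
--     return ret_line
-- ===== SOURCE B (Python) =====
-- def get_cal(line, i):
--     if i <= 0:
--         return line.copy()
--     # forward scan: j = 1 + index of the last non-'.' cell before i (0 if none)
--     j = 0
--     for k in range(i):
--         if line[k] != '.':
--             j = k + 1
--     if j == i:
--         return line.copy()
--     return line[:j] + [line[i]] + ['.'] * (i - j) + line[i + 1:]
-- ===== Notes on version B (the rewrite author's own statement) =====
-- stated objective: alternative
-- what changed: B scans the prefix left-to-right once to find the last non-dot cell before i (so the resting index j), then rebuilds the answer by slice concatenation line[:j]+[line[i]]+['.']*(i-j)+line[i+1:], instead of A's right-to-left scan that repeatedly swaps adjacent cells in a mutable copy plus a special-cased final swap at index 1.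
import Mathlib
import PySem

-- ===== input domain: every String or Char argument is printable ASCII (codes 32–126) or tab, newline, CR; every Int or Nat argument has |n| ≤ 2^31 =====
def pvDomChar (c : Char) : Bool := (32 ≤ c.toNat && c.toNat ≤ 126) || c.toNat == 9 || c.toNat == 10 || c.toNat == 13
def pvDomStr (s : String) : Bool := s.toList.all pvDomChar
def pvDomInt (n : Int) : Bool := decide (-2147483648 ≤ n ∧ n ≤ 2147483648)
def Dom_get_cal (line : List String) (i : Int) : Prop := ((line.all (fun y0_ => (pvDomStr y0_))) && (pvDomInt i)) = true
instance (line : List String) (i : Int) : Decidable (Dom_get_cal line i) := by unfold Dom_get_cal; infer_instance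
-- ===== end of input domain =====

-- B finds the resting index by ONE forward (left-to-right) scan of the prefix and then
-- rebuilds the answer by slice concatenation, instead of A's right-to-left scan with
-- repeated adjacent swaps in a mutable copy (objective: alternative algorithm, same cost).

-- ===== PORT A =====
-- ret_line[i-1], ret_line[i] = ret_line[i], ret_line[i-1]  (both reads from the old ret)
def pvSwap (ret : List String) (i : Int) : List String :=
  PySem.List.pySetD (PySem.List.pySetD ret (i - 1) (PySem.List.pyGetD ret i ""))
    i (PySem.List.pyGetD ret (i - 1) "")

-- while i - 1 > 0 and line[i-1] == '.': swap; i -= 1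
def get_cal_loop (line ret : List String) (i : Int) : List String × Int :=
  if h : 0 < i - 1 ∧ PySem.List.pyGetD line (i - 1) "" = "." then
    get_cal_loop line (pvSwap ret i) (i - 1)
  else (ret, i)
termination_by i.toNat
decreasing_by have := h.1; omega

def get_cal (line : List String) (i : Int) : List String :=
  if (get_cal_loop line line i).2 = 1 ∧
      PySem.List.pyGetD line ((get_cal_loop line line i).2 - 1) "" = "." then
    pvSwap (get_cal_loop line line i).1 (get_cal_loop line line i).2
  else (get_cal_loop line line i).1

-- ===== PORT B =====
-- j = 0; for k in range(i): if line[k] != '.': j = k + 1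
def pvStopJ (line : List String) (i : Int) : Int :=
  (PySem.List.pyRange 0 i 1).foldl
    (fun j k => if PySem.List.pyGetD line k "" ≠ "." then k + 1 else j) 0

-- if i <= 0: copy; j = scan; if j == i: copy; else line[:j] + [line[i]] + ['.']*(i-j) + line[i+1:]
def get_cal_alt (line : List String) (i : Int) : List String :=
  if i ≤ 0 then line
  else if pvStopJ line i = i then line
  else
    PySem.List.slice line none (some (pvStopJ line i)) ++
      [PySem.List.pyGetD line i ""] ++
      List.replicate (i - pvStopJ line i).toNat "." ++
      PySem.List.slice line (some (i + 1)) none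

-- ===== PRECONDITION & SPEC =====
-- Pre_ excludes exactly the inputs where the Python A raises IndexError: i beyond the end of
-- the list (the scan reads line[i-1], a move writes ret_line[i]), i.e. i > len(line), or
-- i = len(line) ≥ 1 with a '.' just left of the end, or i = 1 on an empty list.
def Pre_get_cal (line : List String) (i : Int) : Prop :=
  i ≤ 0 ∨ i < (line.length : Int) ∨
    (i = (line.length : Int) ∧ 1 ≤ line.length ∧ line.getD (line.length - 1) "" ≠ ".")
instance (line : List String) (i : Int) : Decidable (Pre_get_cal line i) := by
  unfold Pre_get_cal; infer_instance

def pvWitness_get_cal : List String × Int := (["#", ".", ".", "O", "#"], 3)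

def Spec_get_cal (line : List String) (i : Int) (out : List String) : Prop := out = get_cal_alt line i
instance (line : List String) (i : Int) (out : List String) : Decidable (Spec_get_cal line i out) := by
  unfold Spec_get_cal; infer_instance

-- ===== CLAIM (what is proved, stated in full; the proofs are below) =====
def Claim_equal_get_cal : Prop := ∀ (line : List String) (i : Int), Dom_get_cal line i → Pre_get_cal line i → Spec_get_cal line i (get_cal line i)

-- ===== LEMMAS AND PROOFS =====

-- Python list indexing with a nonnegative index, as List.getD.
theorem pvGetD_nonneg (xs : List String) (i : Int) (h : 0 ≤ i) (d : String) :
    PySem.List.pyGetD xs i d = xs.getD i.toNat d := by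
  simp only [PySem.List.pyGetD, PySem.List.pyGet?, PySem.List.pyIdx?, List.getD_eq_getElem?_getD,
    if_pos h]
  by_cases hl : i < (xs.length : Int)
  · rw [if_pos hl]; rfl
  · rw [if_neg hl, List.getElem?_eq_none (by omega)]; rfl

theorem pvGetD_set_ne (l : List String) (j k : Nat) (h : j ≠ k) (v d : String) :
    (l.set j v).getD k d = l.getD k d := by
  simp [List.getD_eq_getElem?_getD, List.getElem?_set_ne h]

theorem pvGetD_set_self (l : List String) (k : Nat) (h : k < l.length) (v d : String) :
    (l.set k v).getD k d = v := by
  rw [List.getD_eq_getElem?_getD, List.getElem?_set_self (by omega)]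
  rfl

-- setting a cell to the '.' it already holds is a no-op
theorem pvSet_dot_self (l : List String) (k : Nat) (h : l.getD k "" = ".") : l.set k "." = l := by
  have hk : k < l.length := by
    by_contra hk
    rw [List.getD_eq_getElem?_getD, List.getElem?_eq_none (by omega)] at h
    simp at h
  have hv : l[k] = "." := by
    rw [List.getD_eq_getElem?_getD, List.getElem?_eq_getElem hk] at h
    simpa using h
  rw [← hv]
  exact List.set_getElem_self hk

-- the list after the rock originally at i0 has slid down to j
def pvRetOf (line : List String) (i0 j : Int) : List String :=
  (line.set i0.toNat ".").set j.toNat (line.getD i0.toNat "")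

theorem pvRetOf_self (line : List String) (i0 : Int) (h0 : 0 ≤ i0)
    (hn : i0 < (line.length : Int)) : pvRetOf line i0 i0 = line := by
  unfold pvRetOf
  rw [List.set_set]
  have hb : i0.toNat < line.length := by omega
  rw [List.getD_eq_getElem?_getD, List.getElem?_eq_getElem hb, Option.getD_some]
  exact List.set_getElem_self hb

theorem pvSwap_retOf (line : List String) (i0 j : Int) (h1 : 1 ≤ j) (h2 : j ≤ i0)
    (hn : i0 < (line.length : Int))
    (hd : line.getD (j - 1).toNat "" = ".")
    (hdj : j < i0 → line.getD j.toNat "" = ".") :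
    pvSwap (pvRetOf line i0 j) j = pvRetOf line i0 (j - 1) := by
  have hlen : i0.toNat < line.length := by omega
  have hjlen : j.toNat < line.length := by omega
  set v := line.getD i0.toNat "" with hv
  have hx : PySem.List.pyGetD (pvRetOf line i0 j) j "" = v := by
    rw [pvGetD_nonneg _ _ (by omega)]
    exact pvGetD_set_self _ _ (by simp only [List.length_set]; omega) _ _
  have hy : PySem.List.pyGetD (pvRetOf line i0 j) (j - 1) "" = "." := by
    rw [pvGetD_nonneg _ _ (by omega)]
    unfold pvRetOf
    rw [pvGetD_set_ne _ _ _ (by omega) _ _, pvGetD_set_ne _ _ _ (by omega) _ _]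
    exact hd
  unfold pvSwap
  rw [hx, hy]
  rw [PySem.List.pySetD_of_nonneg _ _ (by omega : (0:Int) ≤ j - 1),
    PySem.List.pySetD_of_nonneg _ _ (by omega : (0:Int) ≤ j)]
  show (((line.set i0.toNat ".").set j.toNat v).set (j-1).toNat v).set j.toNat "." =
    (line.set i0.toNat ".").set (j-1).toNat v
  rw [List.set_comm v v (by omega : j.toNat ≠ (j-1).toNat), List.set_set]
  have hb : ((line.set i0.toNat ".").set (j-1).toNat v).getD j.toNat "" = "." := by
    rw [pvGetD_set_ne _ _ _ (by omega) _ _]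
    by_cases hba : j = i0
    · subst hba
      exact pvGetD_set_self _ _ (by omega) _ _
    · rw [pvGetD_set_ne _ _ _ (by omega) _ _]
      exact hdj (by omega)
  exact pvSet_dot_self _ _ hb

-- pvFindRest: A's resting index (where the left scan stops), used as the common spec
def pvFindRest (line : List String) (j : Int) : Int :=
  if h : 0 < j ∧ PySem.List.pyGetD line (j - 1) "" = "." then pvFindRest line (j - 1) else j
termination_by j.toNat
decreasing_by have := h.1; omega

theorem pvFindRest_le (line : List String) (j : Int) : pvFindRest line j ≤ j := by
  rw [pvFindRest]
  split
  next hc =>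
    have := pvFindRest_le line (j - 1)
    omega
  next hc => omega
termination_by j.toNat
decreasing_by rename_i hc; have := hc.1; omega

theorem pvFindRest_nonneg (line : List String) (j : Int) (h0 : 0 ≤ j) :
    0 ≤ pvFindRest line j := by
  rw [pvFindRest]
  split
  next hc => exact pvFindRest_nonneg line (j - 1) (by omega)
  next hc => omega
termination_by j.toNat
decreasing_by rename_i hc; have := hc.1; omega

theorem pvFindRest_dots (line : List String) (j : Int) :
    ∀ k : Int, pvFindRest line j ≤ k → k < j → line.getD k.toNat "" = "." := by
  rw [pvFindRest]
  split
  next hc =>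
    intro k hk1 hk2
    by_cases hk : k = j - 1
    · subst hk
      rw [← pvGetD_nonneg _ _ (by omega)]
      exact hc.2
    · exact pvFindRest_dots line (j - 1) k hk1 (by omega)
  next hc => intro k hk1 hk2; omega
termination_by j.toNat
decreasing_by rename_i hc; have := hc.1; omega

theorem pvFindRest_stop (line : List String) (j : Int) :
    ¬(0 < pvFindRest line j ∧
      PySem.List.pyGetD line (pvFindRest line j - 1) "" = ".") := by
  rw [pvFindRest]
  split
  next hc => exact pvFindRest_stop line (j - 1)
  next hc => exact hc
termination_by j.toNat
decreasing_by rename_i hc; have := hc.1; omega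

-- B's forward scan computes the same resting index as A's backward scan
theorem pvStopJ_eq_findRest (line : List String) (i : Int) (h0 : 0 ≤ i) :
    pvStopJ line i = pvFindRest line i := by
  by_cases hi : i = 0
  · subst hi
    rw [pvStopJ, pvFindRest]
    rw [PySem.List.pyRange_one_eq_nil (by omega)]
    rw [dif_neg (by intro h; exact absurd h.1 (by omega))]
    rfl
  · have hstep : pvStopJ line i =
        if PySem.List.pyGetD line (i - 1) "" ≠ "." then i else pvStopJ line (i - 1) := by
      unfold pvStopJ
      rw [show PySem.List.pyRange 0 i 1 = PySem.List.pyRange 0 (i - 1) 1 ++ [i - 1] from by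
        have := PySem.List.pyRange_one_succ_right (a := 0) (b := i - 1) (by omega)
        rw [show i - 1 + 1 = i from by omega] at this
        exact this]
      rw [List.foldl_append]
      simp only [List.foldl_cons, List.foldl_nil]
      split
      · omega
      · rfl
    rw [hstep, pvFindRest]
    by_cases hd : PySem.List.pyGetD line (i - 1) "" = "."
    · rw [if_neg (by simp [hd]), dif_pos ⟨by omega, hd⟩]
      exact pvStopJ_eq_findRest line (i - 1) (by omega)
    · rw [if_pos hd, dif_neg (by intro h; exact hd h.2)]
termination_by i.toNat
decreasing_by omega

-- A's loop, run from j with the rock currently at j, lands at max(pvFindRest, 1)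
theorem pvLoop_spec (line : List String) (i0 : Int) (hn : i0 < (line.length : Int))
    (j : Int) (hj1 : 1 ≤ j) (hj2 : j ≤ i0)
    (hd : ∀ k : Int, j ≤ k → k < i0 → line.getD k.toNat "" = ".") :
    get_cal_loop line (pvRetOf line i0 j) j =
      (pvRetOf line i0 (max (pvFindRest line j) 1), max (pvFindRest line j) 1) := by
  rw [get_cal_loop, pvFindRest]
  by_cases hc : 0 < j - 1 ∧ PySem.List.pyGetD line (j - 1) "" = "."
  · rw [dif_pos hc, dif_pos ⟨by omega, hc.2⟩]
    rw [pvSwap_retOf line i0 j hj1 hj2 hn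
      (by rw [← pvGetD_nonneg _ _ (by omega)]; exact hc.2)
      (fun hlt => hd j le_rfl hlt)]
    exact pvLoop_spec line i0 hn (j - 1) (by omega) (by omega)
      (fun k hk1 hk2 => by
        by_cases hkj : k = j - 1
        · subst hkj; rw [← pvGetD_nonneg _ _ (by omega)]; exact hc.2
        · exact hd k (by omega) hk2)
  · rw [dif_neg hc]
    by_cases hc' : 0 < j ∧ PySem.List.pyGetD line (j - 1) "" = "."
    · -- j = 1 and line[0] = '.': find steps to 0, a fixpoint; A's loop stops at 1
      have hj : j = 1 := by
        rcases Decidable.not_and_iff_or_not.mp hc with h | h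
        · omega
        · exact absurd hc'.2 h
      rw [dif_pos hc', hj]
      have h0 : pvFindRest line (1 - 1) = 0 := by
        rw [pvFindRest, dif_neg (by intro h; exact absurd h.1 (by omega))]
        norm_num
      rw [h0]
      simp
    · rw [dif_neg hc']
      have : max j 1 = j := by omega
      rw [this]
termination_by j.toNat
decreasing_by have := hc.1; omega

-- B's concatenation equals the set-based description of the result
theorem pvConcat_eq_retOf (xs : List String) (i j : Int) (h0 : 0 ≤ j) (hji : j < i)
    (hin : i < (xs.length : Int))
    (hd : ∀ k : Int, j ≤ k → k < i → xs.getD k.toNat "" = ".") :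
    xs.take j.toNat ++ [xs.getD i.toNat ""] ++
      List.replicate (i - j).toNat "." ++ xs.drop (i.toNat + 1) = pvRetOf xs i j := by
  have hlen : i.toNat < xs.length := by omega
  apply List.ext_getElem?
  intro n
  have hv : xs[i.toNat]? = some (xs.getD i.toNat "") := by
    rw [List.getElem?_eq_getElem hlen, List.getD_eq_getElem?_getD,
      List.getElem?_eq_getElem hlen]
    rfl
  have hdn : ∀ m : Nat, j.toNat ≤ m → m < i.toNat → xs[m]? = some "." := by
    intro m hm1 hm2
    have := hd (m : Int) (by omega) (by omega)
    simp only [Int.toNat_natCast] at this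
    rw [List.getD_eq_getElem?_getD, List.getElem?_eq_getElem (by omega : m < xs.length)] at this
    rw [List.getElem?_eq_getElem (by omega : m < xs.length)]
    simp only [Option.getD_some] at this
    simp [this]
  simp only [pvRetOf, List.getElem?_append, List.getElem?_set, List.getElem?_take,
    List.getElem?_drop, List.getElem?_replicate, List.getElem?_cons, List.length_append,
    List.length_take, List.length_cons, List.length_nil, List.length_replicate, List.length_set]
  split_ifs <;> try omega
  all_goals try rfl
  all_goals try (exact (hdn n (by omega) (by omega)).symm)
  all_goals (congr 1; omega)
theorem get_cal_spec_aux (line : List String) (i : Int) (hpre : Pre_get_cal line i) :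
    get_cal line i = get_cal_alt line i := by
  by_cases hi0 : i ≤ 0
  · -- no movement possible: both return the unmodified copy
    have hloop : get_cal_loop line line i = (line, i) := by
      rw [get_cal_loop, dif_neg (by intro h; exact absurd h.1 (by omega))]
    unfold get_cal
    rw [hloop]
    rw [if_neg (by intro h; exact absurd h.1 (by omega))]
    unfold get_cal_alt
    rw [if_pos hi0]
  · have hi1 : 1 ≤ i := by omega
    have hJ : pvStopJ line i = pvFindRest line i := pvStopJ_eq_findRest line i (by omega)
    by_cases hin : i < (line.length : Int)
    · -- main case: 1 ≤ i < len
      obtain ⟨r, hr⟩ : ∃ r, pvFindRest line i = r := ⟨_, rfl⟩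
      have hrle : r ≤ i := hr ▸ pvFindRest_le line i
      have hrnn : 0 ≤ r := hr ▸ pvFindRest_nonneg line i (by omega)
      have hdots : ∀ k : Int, r ≤ k → k < i → line.getD k.toNat "" = "." :=
        hr ▸ pvFindRest_dots line i
      have hloop := pvLoop_spec line i hin i hi1 le_rfl (fun k hk1 hk2 => by omega)
      rw [pvRetOf_self line i (by omega) hin, hr] at hloop
      have h1 : (get_cal_loop line line i).1 = pvRetOf line i (max r 1) := by rw [hloop]
      have h2 : (get_cal_loop line line i).2 = max r 1 := by rw [hloop]
      have hB : get_cal_alt line i = pvRetOf line i r := by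
        unfold get_cal_alt
        rw [if_neg (by omega), hJ, hr]
        by_cases hri : r < i
        · rw [if_neg (by omega)]
          rw [show PySem.List.slice line none (some r) = line.take r.toNat from by
            rw [show r = ((r.toNat : Nat) : Int) from by omega]
            exact PySem.List.slice_to_natCast line r.toNat]
          rw [show PySem.List.slice line (some (i + 1)) none = line.drop (i.toNat + 1) from by
            rw [show i + 1 = (((i.toNat + 1 : Nat)) : Int) from by omega]
            exact PySem.List.slice_from_natCast line (i.toNat + 1)]
          rw [pvGetD_nonneg _ _ (by omega)]
          exact pvConcat_eq_retOf line i r hrnn hri hin hdots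
        · have hri' : r = i := by omega
          rw [if_pos hri', hri']
          exact (pvRetOf_self line i (by omega) hin).symm
      unfold get_cal
      rw [h1, h2]
      by_cases hr0 : r = 0
      · -- the rock slides all the way to index 0: A's trailing 'if' does the last swap
        have h01 : max r 1 = 1 := by omega
        rw [h01]
        have hl0 : line.getD 0 "" = "." := by
          have := hdots 0 (by omega) (by omega)
          simpa using this
        rw [if_pos ⟨rfl, by rw [pvGetD_nonneg _ _ (by omega)]; simpa using hl0⟩]
        rw [pvSwap_retOf line i 1 le_rfl (by omega) hin (by simpa using hl0)
          (fun hlt => hdots 1 (by omega) hlt)]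
        rw [hB, hr0]
        norm_num
      · have hm : max r 1 = r := by omega
        rw [hm]
        rw [if_neg (by
          intro h
          apply pvFindRest_stop line i
          rw [hr]
          exact ⟨by omega, h.2⟩)]
        exact hB.symm
    · -- i = len ≥ 1 with a non-'.' last cell: no movement, both return the copy
      have hieq : i = (line.length : Int) := by
        rcases hpre with h | h | h
        · omega
        · omega
        · exact h.1
      have hlast : line.getD (line.length - 1) "" ≠ "." := by
        rcases hpre with h | h | h
        · omega
        · omega
        · exact h.2.2
      have hnd : PySem.List.pyGetD line (i - 1) "" ≠ "." := by
        rw [pvGetD_nonneg _ _ (by omega)]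
        have heq : (i - 1).toNat = line.length - 1 := by omega
        rw [heq]; exact hlast
      have hloop : get_cal_loop line line i = (line, i) := by
        rw [get_cal_loop, dif_neg (by intro h; exact hnd h.2)]
      unfold get_cal
      rw [hloop]
      rw [if_neg (by intro h; exact hnd (h.1 ▸ h.2))]
      unfold get_cal_alt
      rw [if_neg (by omega), hJ]
      rw [show pvFindRest line i = i from by
        rw [pvFindRest, dif_neg (by intro h; exact hnd h.2)]]
      rw [if_pos rfl]

-- ===== VERDICT (by name: the statement is the Claim_ definition above) =====
theorem get_cal_spec : Claim_equal_get_cal := by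
  intro line i _ hpre
  show get_cal line i = get_cal_alt line i
  exact get_cal_spec_aux line i hpre
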